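-- pv_equiv track=rewrite | github.com/willfinnigan/retrobiocat-db | retrobiocat_web/analysis/substrate_table/make_substrate_table.py | get_smi_cats
-- ===== SOURCE A (Python) =====
-- cat_num = {'High': 5,
--            'Medium': 4,
--            'Low': 3,
--            'Active': 2,
--            'Inactive': 1}
--
-- def get_smi_cats(activity_data, smi_col):
--
--     smi_cats = {}
--
--     for act_dict in activity_data:
--         smi = act_dict.get(smi_col, None)
--         if smi is not None and smi != '':
--             level = act_dict.get('categorical', 'None')
--             if level == 'None' or level == '':
--                 binary = act_dict.get('binary', 'False')
--                 if binary == 'False':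
--                     level = 'Inactive'
--                 else:
--                     level = 'Active'
--
--             if smi is None:
--                 pass
--             elif cat_num.get(smi_cats.get(smi, None), 0) < cat_num[level]:
--                 smi_cats[smi] = level
--
--     return smi_cats
-- ===== SOURCE B (Python) =====
-- cat_num = {'High': 5,
--            'Medium': 4,
--            'Low': 3,
--            'Active': 2,
--            'Inactive': 1}
--
--
-- def _level(act_dict):
--     cat = act_dict.get('categorical', 'None')
--     if cat in ('None', ''):
--         return 'Inactive' if act_dict.get('binary', 'False') == 'False' else 'Active'
--     return cat
--
--
-- def get_smi_cats(activity_data, smi_col):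
--     # pass 1: group every derived level under its smiles string
--     groups = {}
--     for act_dict in activity_data:
--         smi = act_dict.get(smi_col)
--         if not smi:
--             continue
--         groups.setdefault(smi, []).append(_level(act_dict))
--     # pass 2: reduce each group to the level with the highest category number
--     return {smi: max(levels, key=lambda lv: cat_num[lv]) for smi, levels in groups.items()}
-- ===== Notes on version B (the rewrite author's own statement) =====
-- stated objective: alternative
-- what changed: A keeps a running best-category dict updated conditionally per row; B first groups all derived levels per smiles into lists and then reduces each group with max keyed by cat_num.
import Mathlib
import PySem

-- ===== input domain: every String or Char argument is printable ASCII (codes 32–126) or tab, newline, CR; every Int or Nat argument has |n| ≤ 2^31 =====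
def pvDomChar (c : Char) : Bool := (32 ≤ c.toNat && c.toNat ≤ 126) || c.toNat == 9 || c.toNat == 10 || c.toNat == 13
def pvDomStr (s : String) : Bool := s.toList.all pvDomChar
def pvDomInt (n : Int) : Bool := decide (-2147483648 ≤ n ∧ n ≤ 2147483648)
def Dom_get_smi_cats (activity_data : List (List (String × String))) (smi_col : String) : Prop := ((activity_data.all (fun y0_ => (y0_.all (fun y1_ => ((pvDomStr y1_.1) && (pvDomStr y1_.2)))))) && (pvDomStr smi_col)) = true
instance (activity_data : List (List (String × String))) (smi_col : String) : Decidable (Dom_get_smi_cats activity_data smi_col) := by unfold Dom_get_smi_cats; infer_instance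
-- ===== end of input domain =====

-- B replaces A's running conditional-max dict with a group-then-reduce decomposition (objective: alternative, same cost).

-- ===== PORT A =====
def catNum : PySem.Dict String Int :=
  PySem.Dict.mk [("High", 5), ("Medium", 4), ("Low", 3), ("Active", 2), ("Inactive", 1)]

def levelOf_a (act : List (String × String)) : String :=
  let level := (PySem.Dict.mk act).getD "categorical" "None"
  if level = "None" ∨ level = "" then
    if (PySem.Dict.mk act).getD "binary" "False" = "False" then "Inactive" else "Active"
  else level

def stepA (smi_col : String) (d : PySem.Dict String String) (act : List (String × String)) :
    PySem.Dict String String :=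
  match (PySem.Dict.mk act).get? smi_col with
  | none => d           -- smi is None
  | some smi =>
    if smi = "" then d
    else
      -- level := levelOf_a act; `if smi is None: pass` is unreachable here (smi is not None);
      -- cat_num[level]: Pre_get_smi_cats guarantees level ∈ cat_num, so getD is exact on Pre_
      if (match d.get? smi with
          | none => (0 : Int)                    -- cat_num.get(None, 0)
          | some prev => catNum.getD prev 0) < catNum.getD (levelOf_a act) 0
      then d.insert smi (levelOf_a act) else d

def get_smi_cats (activity_data : List (List (String × String))) (smi_col : String) :
    List (String × String) :=
  (activity_data.foldl (stepA smi_col) PySem.Dict.empty).items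

-- ===== PORT B =====
def levelOf_b (act : List (String × String)) : String :=
  let cat := (PySem.Dict.mk act).getD "categorical" "None"
  if cat ∈ ["None", ""] then
    if (PySem.Dict.mk act).getD "binary" "False" = "False" then "Inactive" else "Active"
  else cat

-- max(levels, key=lambda lv: cat_num[lv]); B only applies it to nonempty groups, [] is unreachable;
-- Pre_get_smi_cats guarantees every level ∈ cat_num, so getD is exact there
def pyMaxLevel (levels : List String) : String :=
  match levels with
  | [] => ""
  | h :: t => t.foldl (fun best lv => if catNum.getD lv 0 > catNum.getD best 0 then lv else best) h

def stepB (smi_col : String) (g : PySem.Dict String (List String)) (act : List (String × String)) :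
    PySem.Dict String (List String) :=
  match (PySem.Dict.mk act).get? smi_col with
  | none => g            -- `if not smi: continue`
  | some smi =>
    if smi = "" then g
    else g.modify smi [] (· ++ [levelOf_b act])   -- groups.setdefault(smi, []).append(level)

def get_smi_cats_alt (activity_data : List (List (String × String))) (smi_col : String) :
    List (String × String) :=
  (activity_data.foldl (stepB smi_col) PySem.Dict.empty).items.map (fun p => (p.1, pyMaxLevel p.2))

-- ===== PRECONDITION & SPEC =====
-- Pre_ excludes exactly the inputs on which A raises KeyError (a row with a non-empty smiles value
-- whose 'categorical' value is neither 'None'/'' nor a cat_num key); B raises KeyError there too.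
def Pre_get_smi_cats (activity_data : List (List (String × String))) (smi_col : String) : Prop :=
  ∀ act ∈ activity_data,
    (PySem.Dict.mk act).get? smi_col = none ∨
    (PySem.Dict.mk act).get? smi_col = some "" ∨
    (PySem.Dict.mk act).getD "categorical" "None" = "None" ∨
    (PySem.Dict.mk act).getD "categorical" "None" = "" ∨
    catNum.contains ((PySem.Dict.mk act).getD "categorical" "None") = true

instance (activity_data : List (List (String × String))) (smi_col : String) :
    Decidable (Pre_get_smi_cats activity_data smi_col) := by
  unfold Pre_get_smi_cats; infer_instance

def pvWitness_get_smi_cats : (List (List (String × String))) × String :=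
  ([[("smiles", "CC"), ("categorical", "Low")], [("smiles", "CC"), ("binary", "True")]], "smiles")

def Spec_get_smi_cats (activity_data : List (List (String × String))) (smi_col : String) (out : List (String × String)) : Prop := out = get_smi_cats_alt activity_data smi_col
instance (activity_data : List (List (String × String))) (smi_col : String) (out : List (String × String)) : Decidable (Spec_get_smi_cats activity_data smi_col out) := by unfold Spec_get_smi_cats; infer_instance

-- ===== CLAIM (what is proved, stated in full; the proofs are below) =====
def Claim_equal_get_smi_cats : Prop := ∀ (activity_data : List (List (String × String))) (smi_col : String), Dom_get_smi_cats activity_data smi_col → Pre_get_smi_cats activity_data smi_col → Spec_get_smi_cats activity_data smi_col (get_smi_cats activity_data smi_col)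

-- ===== LEMMAS AND PROOFS =====

def mapArg (items : List (String × List String)) : List (String × String) :=
  items.map (fun p => (p.1, pyMaxLevel p.2))

def InvD (g : PySem.Dict String (List String)) : Prop :=
  (∀ p ∈ g.items, p.2 ≠ []) ∧ g.keys.Nodup

lemma level_a_eq_b (act : List (String × String)) : levelOf_a act = levelOf_b act := by
  simp [levelOf_a, levelOf_b]

lemma catD_pos (c : String) (h : catNum.contains c = true) : 1 ≤ catNum.getD c 0 := by
  simp [catNum, PySem.Dict.contains] at h
  rcases h with h | h | h | h | h <;> subst h <;> decide

lemma level_valid (act : List (String × String)) (smi_col : String) (s : String)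
    (hs : (PySem.Dict.mk act).get? smi_col = some s) (hne : s ≠ "")
    (hp : (PySem.Dict.mk act).get? smi_col = none ∨
      (PySem.Dict.mk act).get? smi_col = some "" ∨
      (PySem.Dict.mk act).getD "categorical" "None" = "None" ∨
      (PySem.Dict.mk act).getD "categorical" "None" = "" ∨
      catNum.contains ((PySem.Dict.mk act).getD "categorical" "None") = true) :
    1 ≤ catNum.getD (levelOf_a act) 0 := by
  simp only [levelOf_a]
  by_cases hc : (PySem.Dict.mk act).getD "categorical" "None" = "None" ∨
      (PySem.Dict.mk act).getD "categorical" "None" = ""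
  · rw [if_pos hc]; split <;> decide
  · rw [if_neg hc]
    rcases hp with hp | hp | hp | hp | hp
    · rw [hs] at hp; cases hp
    · rw [hs] at hp; exact absurd (Option.some.inj hp) hne
    · exact absurd (Or.inl hp) hc
    · exact absurd (Or.inr hp) hc
    · exact catD_pos _ hp

lemma pyMaxLevel_append (ls : List String) (l : String) (h : ls ≠ []) :
    pyMaxLevel (ls ++ [l]) =
      if catNum.getD (pyMaxLevel ls) 0 < catNum.getD l 0 then l else pyMaxLevel ls := by
  cases ls with
  | nil => exact absurd rfl h
  | cons a t => simp [pyMaxLevel, List.foldl_append, gt_iff_lt]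

lemma get?_mapArg (items : List (String × List String)) (s : String) :
    (PySem.Dict.mk (mapArg items)).get? s = ((PySem.Dict.mk items).get? s).map pyMaxLevel := by
  simp [PySem.Dict.get?, mapArg, List.find?_map, Function.comp_def, Option.map_map]

lemma contains_mapArg (items : List (String × List String)) (s : String) :
    (PySem.Dict.mk (mapArg items)).contains s = (PySem.Dict.mk items).contains s := by
  simp [PySem.Dict.contains, mapArg, List.any_map, Function.comp_def]

lemma stepCore (g : PySem.Dict String (List String)) (s l : String)
    (hInv : InvD g) (hval : 1 ≤ catNum.getD l 0) :
    (if (match (PySem.Dict.mk (mapArg g.items)).get? s with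
         | none => (0 : Int)
         | some prev => catNum.getD prev 0) < catNum.getD l 0
     then (PySem.Dict.mk (mapArg g.items)).insert s l else PySem.Dict.mk (mapArg g.items))
    = PySem.Dict.mk (mapArg ((g.insert s (g.getD s [] ++ [l])).items)) := by
  by_cases hc : g.contains s = true
  · obtain ⟨v, hv⟩ : ∃ v, g.get? s = some v := by
      have h1 : (g.get? s).isSome = true := by
        rw [← PySem.Dict.contains_eq_isSome_get?]; exact hc
      cases hg : g.get? s with
      | none => rw [hg] at h1; cases h1
      | some v => exact ⟨v, rfl⟩
    have hgd : g.getD s [] = v := by rw [PySem.Dict.getD_eq_get?_getD, hv]; rfl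
    have hvne : v ≠ [] := hInv.1 (s, v) (PySem.Dict.mem_items_of_get?_eq_some _ hv)
    have hA : (PySem.Dict.mk (mapArg g.items)).get? s = some (pyMaxLevel v) := by
      rw [get?_mapArg, hv]; rfl
    have hcA : (PySem.Dict.mk (mapArg g.items)).contains s = true := by
      rw [contains_mapArg]; exact hc
    rw [hgd]
    simp only [hA]
    by_cases hlt : catNum.getD (pyMaxLevel v) 0 < catNum.getD l 0
    · rw [if_pos hlt]
      have hml : pyMaxLevel (v ++ [l]) = l := by
        rw [pyMaxLevel_append v l hvne, if_pos hlt]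
      have h2 := PySem.Dict.items_insert_of_contains _ l hcA
      have h3 := PySem.Dict.items_insert_of_contains _ (v ++ [l]) hc
      apply PySem.Dict.ext
      rw [h2, h3]
      simp only [mapArg, List.map_map]
      apply List.map_congr_left
      intro p hp
      by_cases hps : p.1 = s
      · simp [Function.comp, hps, hml]
      · simp [Function.comp, hps]
    · rw [if_neg hlt]
      have hml : pyMaxLevel (v ++ [l]) = pyMaxLevel v := by
        rw [pyMaxLevel_append v l hvne, if_neg hlt]
      have h3 := PySem.Dict.items_insert_of_contains _ (v ++ [l]) hc
      apply PySem.Dict.ext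
      rw [h3]
      simp only [mapArg, List.map_map]
      refine (List.map_congr_left ?_).symm
      intro p hp
      by_cases hps : p.1 = s
      · have hpv : p.2 = v := by
          have := PySem.Dict.get?_of_mem_items _ (by simpa using hp) hInv.2
          rw [hps, hv] at this
          exact (Option.some.inj this).symm
        simp [Function.comp, hps, hml, hpv]
      · simp [Function.comp, hps]
  · have hc' : g.contains s = false := by simpa using hc
    have hg0 : g.get? s = none := by
      rw [PySem.Dict.get?_eq_none_iff_contains _ _]; exact hc'
    have hA : (PySem.Dict.mk (mapArg g.items)).get? s = none := by
      rw [get?_mapArg, hg0]; rfl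
    have hcA : (PySem.Dict.mk (mapArg g.items)).contains s = false := by
      rw [contains_mapArg]; exact hc'
    rw [show g.getD s [] = [] from by rw [PySem.Dict.getD_eq_get?_getD, hg0]; rfl]
    simp only [hA]
    rw [if_pos (lt_of_lt_of_le Int.zero_lt_one hval)]
    apply PySem.Dict.ext
    rw [PySem.Dict.items_insert_of_not_contains _ l hcA,
        PySem.Dict.items_insert_of_not_contains _ ([] ++ [l]) hc']
    simp [mapArg, pyMaxLevel]

lemma stepRow (smi_col : String) (g : PySem.Dict String (List String))
    (act : List (String × String)) (hInv : InvD g)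
    (hp : (PySem.Dict.mk act).get? smi_col = none ∨
      (PySem.Dict.mk act).get? smi_col = some "" ∨
      (PySem.Dict.mk act).getD "categorical" "None" = "None" ∨
      (PySem.Dict.mk act).getD "categorical" "None" = "" ∨
      catNum.contains ((PySem.Dict.mk act).getD "categorical" "None") = true) :
    stepA smi_col (PySem.Dict.mk (mapArg g.items)) act
      = PySem.Dict.mk (mapArg ((stepB smi_col g act).items)) := by
  cases hg : (PySem.Dict.mk act).get? smi_col with
  | none => simp only [stepA, stepB, hg]
  | some smi =>
    simp only [stepA, stepB, hg]
    by_cases hsm : smi = ""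
    · rw [if_pos hsm, if_pos hsm]
    · rw [if_neg hsm, if_neg hsm]
      have hval := level_valid act smi_col smi hg hsm hp
      have h := stepCore g smi (levelOf_a act) hInv hval
      simp only [PySem.Dict.modify, ← level_a_eq_b]
      exact h

lemma stepB_inv (smi_col : String) (g : PySem.Dict String (List String))
    (act : List (String × String)) (hInv : InvD g) : InvD (stepB smi_col g act) := by
  unfold stepB
  cases (PySem.Dict.mk act).get? smi_col with
  | none => exact hInv
  | some smi =>
    dsimp only []
    by_cases hsm : smi = ""
    · rw [if_pos hsm]; exact hInv
    · rw [if_neg hsm]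
      constructor
      · intro p hp
        rcases (PySem.Dict.mem_items_insert _ _ _ _).mp hp with h | h
        · rw [h]; simp
        · exact hInv.1 p h.1
      · exact PySem.Dict.nodup_keys_insert _ _ _ hInv.2

lemma main_fold (smi_col : String) (data : List (List (String × String)))
    (g : PySem.Dict String (List String)) (hInv : InvD g)
    (hPre : ∀ act ∈ data,
      (PySem.Dict.mk act).get? smi_col = none ∨
      (PySem.Dict.mk act).get? smi_col = some "" ∨
      (PySem.Dict.mk act).getD "categorical" "None" = "None" ∨
      (PySem.Dict.mk act).getD "categorical" "None" = "" ∨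
      catNum.contains ((PySem.Dict.mk act).getD "categorical" "None") = true) :
    data.foldl (stepA smi_col) (PySem.Dict.mk (mapArg g.items))
      = PySem.Dict.mk (mapArg ((data.foldl (stepB smi_col) g).items)) := by
  induction data generalizing g with
  | nil => rfl
  | cons act rest ih =>
    simp only [List.foldl_cons]
    rw [stepRow smi_col g act hInv (hPre act (List.mem_cons_self))]
    exact ih _ (stepB_inv _ _ _ hInv)
      (fun a ha => hPre a (List.mem_cons_of_mem _ ha))

-- ===== VERDICT (by name: the statement is the Claim_ definition above) =====
theorem get_smi_cats_spec : Claim_equal_get_smi_cats := by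
  intro data smi_col _hDom hPre
  unfold Spec_get_smi_cats get_smi_cats get_smi_cats_alt
  have h := main_fold smi_col data PySem.Dict.empty
    (by constructor
        · intro p hp; cases hp
        · simp [PySem.Dict.keys, PySem.Dict.empty])
    hPre
  have : (PySem.Dict.mk (mapArg (PySem.Dict.empty : PySem.Dict String (List String)).items))
      = (PySem.Dict.empty : PySem.Dict String String) := rfl
  rw [this] at h
  rw [h]
  rfl
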